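-- pv_equiv track=rewrite | github.com/devhimanshuu/quorvex_ai | orchestrator/services/security/nuclei_runner.py | _map_nuclei_category
-- ===== SOURCE A (Python) =====
-- def _map_nuclei_category(tags: list[str]) -> str:
--     """Map Nuclei template tags to OWASP category."""
--     tag_set = set(t.lower() for t in tags)
--
--     if tag_set & {"sqli", "sql-injection"}:
--         return "owasp_a03"
--     if tag_set & {"xss", "cross-site-scripting"}:
--         return "owasp_a03"
--     if tag_set & {"rce", "command-injection", "code-injection"}:
--         return "owasp_a03"
--     if tag_set & {"ssrf"}:
--         return "owasp_a10"
--     if tag_set & {"lfi", "rfi", "path-traversal", "file-inclusion"}: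
--         return "owasp_a01"
--     if tag_set & {"auth", "authentication", "default-login", "weak-credentials"}:
--         return "owasp_a07"
--     if tag_set & {"exposure", "disclosure", "misconfig"}:
--         return "owasp_a05"
--     if tag_set & {"cve"}:
--         return "owasp_a06"
--     return "misconfiguration"
-- ===== SOURCE B (Python) =====
-- _TAG_RANK = {
--     "sqli": 1, "sql-injection": 1,
--     "xss": 2, "cross-site-scripting": 2,
--     "rce": 3, "command-injection": 3, "code-injection": 3,
--     "ssrf": 4,
--     "lfi": 5, "rfi": 5, "path-traversal": 5, "file-inclusion": 5,
--     "auth": 6, "authentication": 6, "default-login": 6, "weak-credentials": 6,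
--     "exposure": 7, "disclosure": 7, "misconfig": 7,
--     "cve": 8,
-- }
-- _RANK_CAT = {1: "owasp_a03", 2: "owasp_a03", 3: "owasp_a03", 4: "owasp_a10",
--              5: "owasp_a01", 6: "owasp_a07", 7: "owasp_a05", 8: "owasp_a06"}
--
--
-- def _map_nuclei_category(tags: list[str]) -> str:
--     """Map Nuclei template tags to OWASP category via a single rank-minimizing pass."""
--     best = 9
--     for t in tags:
--         r = _TAG_RANK.get(t.lower(), 9)
--         if r < best:
--             best = r
--     return _RANK_CAT.get(best, "misconfiguration")
-- ===== Notes on version B (the rewrite author's own statement) =====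
-- stated objective: alternative
-- what changed: Replaced the fixed cascade of eight set-intersection branches with one rank-minimizing pass over the tags using a module-level tag->rank dict and a rank->category table.
import Mathlib
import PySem

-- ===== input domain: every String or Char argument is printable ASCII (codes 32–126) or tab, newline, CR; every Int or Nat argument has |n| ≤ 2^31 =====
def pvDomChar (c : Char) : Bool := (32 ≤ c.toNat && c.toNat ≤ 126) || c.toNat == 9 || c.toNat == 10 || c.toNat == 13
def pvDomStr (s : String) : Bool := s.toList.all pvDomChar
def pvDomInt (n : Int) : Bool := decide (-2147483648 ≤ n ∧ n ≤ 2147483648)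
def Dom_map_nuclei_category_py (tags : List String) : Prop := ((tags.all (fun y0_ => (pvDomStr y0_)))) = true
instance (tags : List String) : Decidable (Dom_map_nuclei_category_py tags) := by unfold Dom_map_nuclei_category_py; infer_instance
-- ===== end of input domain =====

-- B replaces A's cascade of eight set-intersection branches with one rank-minimizing
-- pass over the tags driven by a tag->rank dictionary (objective: alternative decomposition).

-- ===== PORT A =====
def map_nuclei_category_py (tags : List String) : String :=
  let tagSet : PySem.Set String := PySem.Set.ofList (tags.map PySem.Str.lower)
  if PySem.Set.inter tagSet ["sqli", "sql-injection"] ≠ [] then "owasp_a03"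
  else if PySem.Set.inter tagSet ["xss", "cross-site-scripting"] ≠ [] then "owasp_a03"
  else if PySem.Set.inter tagSet ["rce", "command-injection", "code-injection"] ≠ [] then "owasp_a03"
  else if PySem.Set.inter tagSet ["ssrf"] ≠ [] then "owasp_a10"
  else if PySem.Set.inter tagSet ["lfi", "rfi", "path-traversal", "file-inclusion"] ≠ [] then "owasp_a01"
  else if PySem.Set.inter tagSet ["auth", "authentication", "default-login", "weak-credentials"] ≠ [] then "owasp_a07"
  else if PySem.Set.inter tagSet ["exposure", "disclosure", "misconfig"] ≠ [] then "owasp_a05"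
  else if PySem.Set.inter tagSet ["cve"] ≠ [] then "owasp_a06"
  else "misconfiguration"

-- ===== PORT B =====
def pvTagRank : PySem.Dict String Int := PySem.Dict.ofList
  [("sqli", 1), ("sql-injection", 1),
   ("xss", 2), ("cross-site-scripting", 2),
   ("rce", 3), ("command-injection", 3), ("code-injection", 3),
   ("ssrf", 4),
   ("lfi", 5), ("rfi", 5), ("path-traversal", 5), ("file-inclusion", 5),
   ("auth", 6), ("authentication", 6), ("default-login", 6), ("weak-credentials", 6),
   ("exposure", 7), ("disclosure", 7), ("misconfig", 7),
   ("cve", 8)]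

def pvRankCat : PySem.Dict Int String := PySem.Dict.ofList
  [(1, "owasp_a03"), (2, "owasp_a03"), (3, "owasp_a03"), (4, "owasp_a10"),
   (5, "owasp_a01"), (6, "owasp_a07"), (7, "owasp_a05"), (8, "owasp_a06")]

def map_nuclei_category_py_alt (tags : List String) : String :=
  let best := tags.foldl (fun best t =>
    let r := PySem.Dict.getD pvTagRank (PySem.Str.lower t) 9
    if r < best then r else best) 9
  PySem.Dict.getD pvRankCat best "misconfiguration"

-- ===== PRECONDITION & SPEC =====
def Spec_map_nuclei_category_py (tags : List String) (out : String) : Prop := out = map_nuclei_category_py_alt tags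
instance (tags : List String) (out : String) : Decidable (Spec_map_nuclei_category_py tags out) := by unfold Spec_map_nuclei_category_py; infer_instance

-- ===== CLAIM (what is proved, stated in full; the proofs are below) =====
def Claim_equal_map_nuclei_category_py : Prop := ∀ (tags : List String), Dom_map_nuclei_category_py tags → Spec_map_nuclei_category_py tags (map_nuclei_category_py tags)

-- ===== LEMMAS AND PROOFS =====

-- the rank B's fold assigns to each (already lowered) tag
def pvRank (x : String) : Int := PySem.Dict.getD pvTagRank x 9

-- B's fold over a lowered tag list, from an arbitrary start value
def pvFold (L : List String) (b : Int) : Int :=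
  L.foldl (fun best x => let r := pvRank x; if r < best then r else best) b

def pvPairs : List (String × Int) :=
  [("sqli", 1), ("sql-injection", 1),
   ("xss", 2), ("cross-site-scripting", 2),
   ("rce", 3), ("command-injection", 3), ("code-injection", 3),
   ("ssrf", 4),
   ("lfi", 5), ("rfi", 5), ("path-traversal", 5), ("file-inclusion", 5),
   ("auth", 6), ("authentication", 6), ("default-login", 6), ("weak-credentials", 6),
   ("exposure", 7), ("disclosure", 7), ("misconfig", 7),
   ("cve", 8)]

set_option maxHeartbeats 1000000 in
lemma pvTagRank_mk : pvTagRank = PySem.Dict.mk pvPairs := by decide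

set_option maxHeartbeats 1000000 in
lemma pvNodupKeys : pvTagRank.keys.Nodup := by rw [pvTagRank_mk]; decide

lemma pvItems : pvTagRank.items = pvPairs := by rw [pvTagRank_mk]

lemma pvGet?_cases (x : String) :
    (pvTagRank.get? x = none ∧ pvRank x = 9) ∨ pvTagRank.get? x = some (pvRank x) := by
  rw [pvRank, PySem.Dict.getD_eq_get?_getD]
  cases h : pvTagRank.get? x <;> simp

lemma pvRank_eq_iff (x : String) (i : Int) (h9 : i ≠ 9) :
    pvRank x = i ↔ (x, i) ∈ pvPairs := by
  rw [← pvItems]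
  rcases pvGet?_cases x with ⟨hn, h9'⟩ | hs
  · constructor
    · intro h; exact absurd (by omega : i = 9) h9
    · intro hmem
      have := PySem.Dict.get?_of_mem_items _ hmem pvNodupKeys
      rw [hn] at this; exact absurd this (by simp)
  · constructor
    · intro h; rw [← h]; exact PySem.Dict.mem_items_of_get?_eq_some _ hs
    · intro hmem
      have := PySem.Dict.get?_of_mem_items _ hmem pvNodupKeys
      rw [hs] at this
      exact Option.some_inj.mp this

set_option maxHeartbeats 1000000 in
lemma pvRank_range (x : String) : pvRank x = 9 ∨ (1 ≤ pvRank x ∧ pvRank x ≤ 8) := by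
  rcases pvGet?_cases x with ⟨_, h9⟩ | hs
  · left; exact h9
  · right
    have hmem := PySem.Dict.mem_items_of_get?_eq_some _ hs
    rw [pvItems] at hmem
    have hall : ∀ p ∈ pvPairs, 1 ≤ p.2 ∧ p.2 ≤ 8 := by decide
    exact hall _ hmem

lemma pvRank_eq_one_iff (x : String) : pvRank x = 1 ↔ x ∈ ["sqli", "sql-injection"] := by
  rw [pvRank_eq_iff x 1 (by norm_num)]; simp [pvPairs]

lemma pvRank_eq_two_iff (x : String) : pvRank x = 2 ↔ x ∈ ["xss", "cross-site-scripting"] := by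
  rw [pvRank_eq_iff x 2 (by norm_num)]; simp [pvPairs]

lemma pvRank_eq_three_iff (x : String) : pvRank x = 3 ↔ x ∈ ["rce", "command-injection", "code-injection"] := by
  rw [pvRank_eq_iff x 3 (by norm_num)]; simp [pvPairs]

lemma pvRank_eq_four_iff (x : String) : pvRank x = 4 ↔ x ∈ ["ssrf"] := by
  rw [pvRank_eq_iff x 4 (by norm_num)]; simp [pvPairs]

lemma pvRank_eq_five_iff (x : String) : pvRank x = 5 ↔ x ∈ ["lfi", "rfi", "path-traversal", "file-inclusion"] := by
  rw [pvRank_eq_iff x 5 (by norm_num)]; simp [pvPairs]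

lemma pvRank_eq_six_iff (x : String) : pvRank x = 6 ↔ x ∈ ["auth", "authentication", "default-login", "weak-credentials"] := by
  rw [pvRank_eq_iff x 6 (by norm_num)]; simp [pvPairs]

lemma pvRank_eq_seven_iff (x : String) : pvRank x = 7 ↔ x ∈ ["exposure", "disclosure", "misconfig"] := by
  rw [pvRank_eq_iff x 7 (by norm_num)]; simp [pvPairs]

lemma pvRank_eq_eight_iff (x : String) : pvRank x = 8 ↔ x ∈ ["cve"] := by
  rw [pvRank_eq_iff x 8 (by norm_num)]; simp [pvPairs]

lemma pvInter_ne_nil_iff (L g : List String) :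
    PySem.Set.inter (PySem.Set.ofList L) g ≠ [] ↔ ∃ x ∈ L, x ∈ g := by
  rw [Ne, List.eq_nil_iff_forall_not_mem]
  push_neg
  simp [PySem.Set.mem_inter, PySem.Set.mem_ofList]

-- the fold's value is the start or some rank, and is a lower bound of both
lemma pvFold_cons (y : String) (ys : List String) (b : Int) :
    pvFold (y :: ys) b = pvFold ys (if pvRank y < b then pvRank y else b) := rfl

lemma pvFold_spec (L : List String) (b : Int) :
    (pvFold L b = b ∨ ∃ x ∈ L, pvFold L b = pvRank x) ∧
    pvFold L b ≤ b ∧ ∀ x ∈ L, pvFold L b ≤ pvRank x := by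
  induction L generalizing b with
  | nil => simp [pvFold]
  | cons y ys ih =>
    by_cases hc : pvRank y < b
    · rw [pvFold_cons, if_pos hc]
      rcases ih (pvRank y) with ⟨h1, h2, h3⟩
      refine ⟨?_, ?_, ?_⟩
      · rcases h1 with h | ⟨x, hx, hfx⟩
        · exact Or.inr ⟨y, List.mem_cons_self .., h⟩
        · exact Or.inr ⟨x, List.mem_cons_of_mem _ hx, hfx⟩
      · omega
      · intro x hx
        rcases List.mem_cons.mp hx with rfl | hx'
        · exact h2
        · exact h3 x hx'
    · rw [pvFold_cons, if_neg hc]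
      rcases ih b with ⟨h1, h2, h3⟩
      refine ⟨?_, ?_, ?_⟩
      · rcases h1 with h | ⟨x, hx, hfx⟩
        · exact Or.inl h
        · exact Or.inr ⟨x, List.mem_cons_of_mem _ hx, hfx⟩
      · exact h2
      · intro x hx
        rcases List.mem_cons.mp hx with rfl | hx'
        · omega
        · exact h3 x hx'

lemma pvBest_eq (L : List String) (i : Int) (hi8 : i ≤ 8)
    (hw : ∃ x ∈ L, pvRank x = i) (hlow : ∀ x ∈ L, i ≤ pvRank x ∨ pvRank x = 9) :
    pvFold L 9 = i := by
  obtain ⟨h1, h2, h3⟩ := pvFold_spec L 9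
  obtain ⟨x, hx, hrx⟩ := hw
  have hub := h3 x hx
  rcases h1 with h | ⟨x0, hx0, hfx0⟩
  · omega
  · rcases hlow x0 hx0 with h' | h' <;> omega

lemma pvBest_default (L : List String) (h9 : ∀ x ∈ L, pvRank x = 9) : pvFold L 9 = 9 := by
  obtain ⟨h1, h2, h3⟩ := pvFold_spec L 9
  rcases h1 with h | ⟨x0, hx0, hfx0⟩
  · omega
  · have := h9 x0 hx0; omega

lemma pvAlt_eq (tags : List String) :
    map_nuclei_category_py_alt tags = PySem.Dict.getD pvRankCat (pvFold (tags.map PySem.Str.lower) 9) "misconfiguration" := by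
  simp only [map_nuclei_category_py_alt, pvFold, pvRank, List.foldl_map]

-- ===== VERDICT (by name: the statement is the Claim_ definition above) =====
theorem map_nuclei_category_py_spec : Claim_equal_map_nuclei_category_py := by
  unfold Claim_equal_map_nuclei_category_py
  intro tags _
  unfold Spec_map_nuclei_category_py
  rw [pvAlt_eq]
  set L := tags.map PySem.Str.lower with hL
  simp only [map_nuclei_category_py, ← hL]
  by_cases h1 : ∃ x ∈ L, x ∈ ["sqli", "sql-injection"]
  · rw [if_pos ((pvInter_ne_nil_iff L _).mpr h1)]
    obtain ⟨x, hx, hm⟩ := h1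
    rw [pvBest_eq L 1 (by omega) ⟨x, hx, (pvRank_eq_one_iff x).mpr hm⟩
      (fun y _ => by rcases pvRank_range y with h | h <;> omega)]
    rfl
  · rw [if_neg (fun hc => h1 ((pvInter_ne_nil_iff L _).mp hc))]
    by_cases h2 : ∃ x ∈ L, x ∈ ["xss", "cross-site-scripting"]
    · rw [if_pos ((pvInter_ne_nil_iff L _).mpr h2)]
      obtain ⟨x, hx, hm⟩ := h2
      rw [pvBest_eq L 2 (by omega) ⟨x, hx, (pvRank_eq_two_iff x).mpr hm⟩ (fun y hy => by
        rcases pvRank_range y with h | h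
        · omega
        · have n1 : pvRank y ≠ 1 := fun hr => h1 ⟨y, hy, (pvRank_eq_one_iff y).mp hr⟩
          omega)]
      rfl
    · rw [if_neg (fun hc => h2 ((pvInter_ne_nil_iff L _).mp hc))]
      by_cases h3 : ∃ x ∈ L, x ∈ ["rce", "command-injection", "code-injection"]
      · rw [if_pos ((pvInter_ne_nil_iff L _).mpr h3)]
        obtain ⟨x, hx, hm⟩ := h3
        rw [pvBest_eq L 3 (by omega) ⟨x, hx, (pvRank_eq_three_iff x).mpr hm⟩ (fun y hy => by
          rcases pvRank_range y with h | h
          · omega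
          · have n1 : pvRank y ≠ 1 := fun hr => h1 ⟨y, hy, (pvRank_eq_one_iff y).mp hr⟩
            have n2 : pvRank y ≠ 2 := fun hr => h2 ⟨y, hy, (pvRank_eq_two_iff y).mp hr⟩
            omega)]
        rfl
      · rw [if_neg (fun hc => h3 ((pvInter_ne_nil_iff L _).mp hc))]
        by_cases h4 : ∃ x ∈ L, x ∈ ["ssrf"]
        · rw [if_pos ((pvInter_ne_nil_iff L _).mpr h4)]
          obtain ⟨x, hx, hm⟩ := h4
          rw [pvBest_eq L 4 (by omega) ⟨x, hx, (pvRank_eq_four_iff x).mpr hm⟩ (fun y hy => by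
            rcases pvRank_range y with h | h
            · omega
            · have n1 : pvRank y ≠ 1 := fun hr => h1 ⟨y, hy, (pvRank_eq_one_iff y).mp hr⟩
              have n2 : pvRank y ≠ 2 := fun hr => h2 ⟨y, hy, (pvRank_eq_two_iff y).mp hr⟩
              have n3 : pvRank y ≠ 3 := fun hr => h3 ⟨y, hy, (pvRank_eq_three_iff y).mp hr⟩
              omega)]
          rfl
        · rw [if_neg (fun hc => h4 ((pvInter_ne_nil_iff L _).mp hc))]
          by_cases h5 : ∃ x ∈ L, x ∈ ["lfi", "rfi", "path-traversal", "file-inclusion"]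
          · rw [if_pos ((pvInter_ne_nil_iff L _).mpr h5)]
            obtain ⟨x, hx, hm⟩ := h5
            rw [pvBest_eq L 5 (by omega) ⟨x, hx, (pvRank_eq_five_iff x).mpr hm⟩ (fun y hy => by
              rcases pvRank_range y with h | h
              · omega
              · have n1 : pvRank y ≠ 1 := fun hr => h1 ⟨y, hy, (pvRank_eq_one_iff y).mp hr⟩
                have n2 : pvRank y ≠ 2 := fun hr => h2 ⟨y, hy, (pvRank_eq_two_iff y).mp hr⟩
                have n3 : pvRank y ≠ 3 := fun hr => h3 ⟨y, hy, (pvRank_eq_three_iff y).mp hr⟩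
                have n4 : pvRank y ≠ 4 := fun hr => h4 ⟨y, hy, (pvRank_eq_four_iff y).mp hr⟩
                omega)]
            rfl
          · rw [if_neg (fun hc => h5 ((pvInter_ne_nil_iff L _).mp hc))]
            by_cases h6 : ∃ x ∈ L, x ∈ ["auth", "authentication", "default-login", "weak-credentials"]
            · rw [if_pos ((pvInter_ne_nil_iff L _).mpr h6)]
              obtain ⟨x, hx, hm⟩ := h6
              rw [pvBest_eq L 6 (by omega) ⟨x, hx, (pvRank_eq_six_iff x).mpr hm⟩ (fun y hy => by
                rcases pvRank_range y with h | h
                · omega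
                · have n1 : pvRank y ≠ 1 := fun hr => h1 ⟨y, hy, (pvRank_eq_one_iff y).mp hr⟩
                  have n2 : pvRank y ≠ 2 := fun hr => h2 ⟨y, hy, (pvRank_eq_two_iff y).mp hr⟩
                  have n3 : pvRank y ≠ 3 := fun hr => h3 ⟨y, hy, (pvRank_eq_three_iff y).mp hr⟩
                  have n4 : pvRank y ≠ 4 := fun hr => h4 ⟨y, hy, (pvRank_eq_four_iff y).mp hr⟩
                  have n5 : pvRank y ≠ 5 := fun hr => h5 ⟨y, hy, (pvRank_eq_five_iff y).mp hr⟩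
                  omega)]
              rfl
            · rw [if_neg (fun hc => h6 ((pvInter_ne_nil_iff L _).mp hc))]
              by_cases h7 : ∃ x ∈ L, x ∈ ["exposure", "disclosure", "misconfig"]
              · rw [if_pos ((pvInter_ne_nil_iff L _).mpr h7)]
                obtain ⟨x, hx, hm⟩ := h7
                rw [pvBest_eq L 7 (by omega) ⟨x, hx, (pvRank_eq_seven_iff x).mpr hm⟩ (fun y hy => by
                  rcases pvRank_range y with h | h
                  · omega
                  · have n1 : pvRank y ≠ 1 := fun hr => h1 ⟨y, hy, (pvRank_eq_one_iff y).mp hr⟩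
                    have n2 : pvRank y ≠ 2 := fun hr => h2 ⟨y, hy, (pvRank_eq_two_iff y).mp hr⟩
                    have n3 : pvRank y ≠ 3 := fun hr => h3 ⟨y, hy, (pvRank_eq_three_iff y).mp hr⟩
                    have n4 : pvRank y ≠ 4 := fun hr => h4 ⟨y, hy, (pvRank_eq_four_iff y).mp hr⟩
                    have n5 : pvRank y ≠ 5 := fun hr => h5 ⟨y, hy, (pvRank_eq_five_iff y).mp hr⟩
                    have n6 : pvRank y ≠ 6 := fun hr => h6 ⟨y, hy, (pvRank_eq_six_iff y).mp hr⟩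
                    omega)]
                rfl
              · rw [if_neg (fun hc => h7 ((pvInter_ne_nil_iff L _).mp hc))]
                by_cases h8 : ∃ x ∈ L, x ∈ ["cve"]
                · rw [if_pos ((pvInter_ne_nil_iff L _).mpr h8)]
                  obtain ⟨x, hx, hm⟩ := h8
                  rw [pvBest_eq L 8 (by omega) ⟨x, hx, (pvRank_eq_eight_iff x).mpr hm⟩ (fun y hy => by
                    rcases pvRank_range y with h | h
                    · omega
                    · have n1 : pvRank y ≠ 1 := fun hr => h1 ⟨y, hy, (pvRank_eq_one_iff y).mp hr⟩
                      have n2 : pvRank y ≠ 2 := fun hr => h2 ⟨y, hy, (pvRank_eq_two_iff y).mp hr⟩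
                      have n3 : pvRank y ≠ 3 := fun hr => h3 ⟨y, hy, (pvRank_eq_three_iff y).mp hr⟩
                      have n4 : pvRank y ≠ 4 := fun hr => h4 ⟨y, hy, (pvRank_eq_four_iff y).mp hr⟩
                      have n5 : pvRank y ≠ 5 := fun hr => h5 ⟨y, hy, (pvRank_eq_five_iff y).mp hr⟩
                      have n6 : pvRank y ≠ 6 := fun hr => h6 ⟨y, hy, (pvRank_eq_six_iff y).mp hr⟩
                      have n7 : pvRank y ≠ 7 := fun hr => h7 ⟨y, hy, (pvRank_eq_seven_iff y).mp hr⟩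
                      omega)]
                  rfl
                · rw [if_neg (fun hc => h8 ((pvInter_ne_nil_iff L _).mp hc))]
                  rw [pvBest_default L (fun y hy => by
                    rcases pvRank_range y with h | h
                    · exact h
                    · have n1 : pvRank y ≠ 1 := fun hr => h1 ⟨y, hy, (pvRank_eq_one_iff y).mp hr⟩
                      have n2 : pvRank y ≠ 2 := fun hr => h2 ⟨y, hy, (pvRank_eq_two_iff y).mp hr⟩
                      have n3 : pvRank y ≠ 3 := fun hr => h3 ⟨y, hy, (pvRank_eq_three_iff y).mp hr⟩
                      have n4 : pvRank y ≠ 4 := fun hr => h4 ⟨y, hy, (pvRank_eq_four_iff y).mp hr⟩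
                      have n5 : pvRank y ≠ 5 := fun hr => h5 ⟨y, hy, (pvRank_eq_five_iff y).mp hr⟩
                      have n6 : pvRank y ≠ 6 := fun hr => h6 ⟨y, hy, (pvRank_eq_six_iff y).mp hr⟩
                      have n7 : pvRank y ≠ 7 := fun hr => h7 ⟨y, hy, (pvRank_eq_seven_iff y).mp hr⟩
                      have n8 : pvRank y ≠ 8 := fun hr => h8 ⟨y, hy, (pvRank_eq_eight_iff y).mp hr⟩
                      omega)]
                  rfl
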